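-- pv_equiv track=rewrite | github.com/n3bch4S/algor-lab | lab03/6434439723lab03.py | impCirLeft
-- ===== SOURCE A (Python) =====
-- PASSENGER = "P"
--
-- def impCirLeft(arr, grb, k, selectedPassenger) :
--     n = len(arr)
--     drcts = [-1, 1]
--     for step in range(k, 0, -1) :
--         for drct in drcts :
--             pnt = grb + step * drct
--             if pnt >= n or pnt < 0:
--                 continue
--             pick = arr[pnt].lower()
--             if pick == PASSENGER.lower() and pnt not in selectedPassenger :
--                 return pnt
--     return grb
-- ===== SOURCE B (Python) =====
-- PASSENGER = "P"
--
-- def impCirLeft(arr, grb, k, selectedPassenger):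
--     n = len(arr)
--     lo = max(0, grb - k)
--     hi = min(n - 1, grb + k)
--     cands = [p for p in range(lo, hi + 1)
--              if p != grb and arr[p].lower() == PASSENGER.lower()
--              and p not in selectedPassenger]
--     return min(cands, key=lambda p: (-abs(p - grb), 0 if p < grb else 1), default=grb)
-- ===== Notes on version B (the rewrite author's own statement) =====
-- stated objective: alternative
-- what changed: A's nested early-return scan (distance descending, left then right) is replaced by a gather-then-select: one comprehension collects every free passenger position in the window, then a single keyed min (key = (-distance, left-before-right)) picks the winner, defaulting to grb.
import Mathlib
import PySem

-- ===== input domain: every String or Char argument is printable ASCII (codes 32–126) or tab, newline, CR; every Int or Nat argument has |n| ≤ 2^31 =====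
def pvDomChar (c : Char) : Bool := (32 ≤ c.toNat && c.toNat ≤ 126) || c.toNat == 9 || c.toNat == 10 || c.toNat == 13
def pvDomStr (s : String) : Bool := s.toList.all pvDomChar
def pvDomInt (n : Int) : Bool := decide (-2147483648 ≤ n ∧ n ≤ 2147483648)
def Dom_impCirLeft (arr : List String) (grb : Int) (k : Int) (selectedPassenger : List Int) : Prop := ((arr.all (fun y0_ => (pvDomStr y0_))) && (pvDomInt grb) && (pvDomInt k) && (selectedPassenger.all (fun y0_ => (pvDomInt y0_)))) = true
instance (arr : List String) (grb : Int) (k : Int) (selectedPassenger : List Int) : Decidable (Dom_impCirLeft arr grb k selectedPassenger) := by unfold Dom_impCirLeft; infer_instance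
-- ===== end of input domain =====

-- B replaces A's step-by-step scan (distance descending, left then right, early return)
-- by a gather-then-select: collect all candidate positions in one range pass, then pick
-- the winner with a single keyed min (objective: alternative decomposition, same cost).

-- ===== PORT A =====
-- one position test of A's inner loop body: `continue` → none, `return pnt` → some pnt
def pvCheckA (arr : List String) (sel : List Int) (n pnt : Int) : Option Int :=
  if pnt ≥ n ∨ pnt < 0 then none
  else
    match PySem.List.pyGet? arr pnt with
    | none => none   -- unreachable: the guard above ensures 0 ≤ pnt < n = len(arr)
    | some s =>
      if PySem.Str.lower s = PySem.Str.lower "P" ∧ pnt ∉ sel then some pnt else none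

-- the inner `for drct in drcts` loop
def pvInnerA (arr : List String) (grb : Int) (sel : List Int) (n step : Int) : List Int → Option Int
  | [] => none
  | drct :: ds =>
    match pvCheckA arr sel n (grb + step * drct) with
    | some p => some p
    | none => pvInnerA arr grb sel n step ds

-- the outer `for step in range(k, 0, -1)` loop with early return
def pvLoopA (arr : List String) (grb : Int) (sel : List Int) (n : Int) : List Int → Int
  | [] => grb
  | step :: rest =>
    match pvInnerA arr grb sel n step [-1, 1] with
    | some p => p
    | none => pvLoopA arr grb sel n rest

def impCirLeft (arr : List String) (grb : Int) (k : Int) (selectedPassenger : List Int) : Int :=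
  pvLoopA arr grb selectedPassenger (arr.length : Int) (PySem.List.pyRange k 0 (-1))

-- ===== PORT B =====
-- candidate test of B's comprehension
def pvGoodB (arr : List String) (grb : Int) (sel : List Int) (p : Int) : Bool :=
  decide (p ≠ grb ∧
    PySem.Str.lower ((PySem.List.pyGet? arr p).getD "") = PySem.Str.lower "P" ∧
    p ∉ sel)

def pvKey1 (grb p : Int) : Int := -(((p - grb).natAbs : Int))
def pvKey2 (grb p : Int) : Int := if p < grb then 0 else 1

-- the comprehension `[p for p in range(lo, hi+1) if …]`
def pvCands (arr : List String) (grb k : Int) (sel : List Int) : List Int :=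
  (PySem.List.pyRange (max 0 (grb - k)) (min ((arr.length : Int) - 1) (grb + k) + 1)).filter
    (pvGoodB arr grb sel)

def impCirLeft_alt (arr : List String) (grb : Int) (k : Int) (selectedPassenger : List Int) : Int :=
  (PySem.List.min2? (pvCands arr grb k selectedPassenger) (pvKey1 grb) (pvKey2 grb)).getD grb

-- ===== PRECONDITION & SPEC =====
def Spec_impCirLeft (arr : List String) (grb : Int) (k : Int) (selectedPassenger : List Int) (out : Int) : Prop := out = impCirLeft_alt arr grb k selectedPassenger
instance (arr : List String) (grb : Int) (k : Int) (selectedPassenger : List Int) (out : Int) : Decidable (Spec_impCirLeft arr grb k selectedPassenger out) := by unfold Spec_impCirLeft; infer_instance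

-- ===== CLAIM (what is proved, stated in full; the proofs are below) =====
def Claim_equal_impCirLeft : Prop := ∀ (arr : List String) (grb : Int) (k : Int) (selectedPassenger : List Int), Dom_impCirLeft arr grb k selectedPassenger → Spec_impCirLeft arr grb k selectedPassenger (impCirLeft arr grb k selectedPassenger)

-- ===== LEMMAS AND PROOFS =====

-- the fold step of Python's `min(…, key=…)` (first minimal element, lexicographic key)
def pvBeats (grb x m : Int) : Bool :=
  decide (pvKey1 grb x < pvKey1 grb m) ||
    (!decide (pvKey1 grb m < pvKey1 grb x) && decide (pvKey2 grb x < pvKey2 grb m))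

def pvF (grb : Int) (acc : Option Int) (x : Int) : Option Int :=
  match acc with
  | none => some x
  | some m => if pvBeats grb x m then some x else some m

theorem pv_min2_eq_foldl (grb : Int) (xs : List Int) :
    PySem.List.min2? xs (pvKey1 grb) (pvKey2 grb) = xs.foldl (pvF grb) none := by
  unfold PySem.List.min2?
  congr 1
  funext acc x
  cases acc <;> rfl

theorem pv_foldl_some_const (grb : Int) (m : Int) (l : List Int)
    (h : ∀ y ∈ l, pvBeats grb y m = false) :
    l.foldl (pvF grb) (some m) = some m := by
  induction l with
  | nil => rfl
  | cons y l ih =>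
    simp only [List.foldl_cons, pvF, h y (by simp)]
    exact ih (fun z hz => h z (by simp [hz]))

theorem pv_foldl_none_mem (grb : Int) (l : List Int) (m : Int)
    (h : l.foldl (pvF grb) none = some m) : m ∈ l := by
  have gen : ∀ (l : List Int) (acc : Option Int) (m : Int),
      l.foldl (pvF grb) acc = some m → m ∈ l ∨ acc = some m := by
    intro l
    induction l with
    | nil => intro acc m h; exact Or.inr h
    | cons y l ih =>
      intro acc m h
      simp only [List.foldl_cons] at h
      rcases ih _ _ h with h1 | h1
      · exact Or.inl (by simp [h1])
      · cases acc with
        | none => simp [pvF] at h1; exact Or.inl (by simp [h1])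
        | some a =>
          simp only [pvF] at h1
          split at h1
          · exact Or.inl (by simp_all)
          · exact Or.inr h1
  rcases gen l none m h with h1 | h1
  · exact h1
  · simp at h1

theorem pvCheckA_eq (arr : List String) (sel : List Int) (grb p : Int) (hne : p ≠ grb) :
    pvCheckA arr sel (arr.length : Int) p =
      if 0 ≤ p ∧ p < (arr.length : Int) ∧ pvGoodB arr grb sel p = true then some p else none := by
  unfold pvCheckA pvGoodB
  by_cases hr : p ≥ (arr.length : Int) ∨ p < 0
  · rw [if_pos hr, if_neg]
    rintro ⟨h1, h2, -⟩
    omega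
  · push Not at hr
    rw [if_neg (by omega)]
    rw [PySem.List.pyGet?_of_nonneg_of_lt arr (by omega) (by omega),
      List.getElem?_eq_getElem (by omega)]
    simp only [Option.getD_some]
    split_ifs with h1 h2 <;> simp_all

theorem pv_mem_cands (arr : List String) (grb k : Int) (sel : List Int) (y : Int)
    (h : y ∈ pvCands arr grb k sel) :
    max 0 (grb - k) ≤ y ∧ y ≤ min ((arr.length : Int) - 1) (grb + k) ∧
      pvGoodB arr grb sel y = true := by
  unfold pvCands at h
  rw [List.mem_filter, PySem.List.mem_pyRange_one] at h
  exact ⟨h.1.1, by omega, h.2⟩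

theorem pvB_nonpos (arr : List String) (grb k : Int) (sel : List Int) (hk : k ≤ 0) :
    impCirLeft_alt arr grb k sel = grb := by
  unfold impCirLeft_alt
  have hc : pvCands arr grb k sel = [] := by
    unfold pvCands
    by_cases hE : min ((arr.length : Int) - 1) (grb + k) + 1 ≤ max 0 (grb - k)
    · rw [PySem.List.pyRange_one_eq_nil hE]; rfl
    · -- only possible for k = 0 with 0 ≤ grb ≤ n - 1: the range is [grb], filtered out
      have hk0 : k = 0 := by omega
      have hg : 0 ≤ grb ∧ grb ≤ (arr.length : Int) - 1 := by omega
      have h1 : max 0 (grb - k) = grb := by omega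
      have h2 : min ((arr.length : Int) - 1) (grb + k) = grb := by omega
      rw [h1, h2, PySem.List.pyRange_one_singleton]
      simp [pvGoodB]
  rw [hc, pv_min2_eq_foldl]
  rfl

theorem pvB_rec (arr : List String) (grb k : Int) (sel : List Int) (hk : 1 ≤ k) :
    impCirLeft_alt arr grb k sel =
      if 0 ≤ grb - k ∧ grb - k < (arr.length : Int) ∧ pvGoodB arr grb sel (grb - k) = true then grb - k
      else if 0 ≤ grb + k ∧ grb + k < (arr.length : Int) ∧ pvGoodB arr grb sel (grb + k) = true then grb + k
      else impCirLeft_alt arr grb (k - 1) sel := by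
  have hnn : (0:Int) ≤ (arr.length : Int) := Int.natCast_nonneg _
  by_cases hE : min ((arr.length : Int) - 1) (grb + k) + 1 ≤ max 0 (grb - k)
  · -- the whole window misses the array: every part is empty
    have hA : impCirLeft_alt arr grb k sel = grb := by
      unfold impCirLeft_alt pvCands
      rw [PySem.List.pyRange_one_eq_nil hE]
      rfl
    have hA' : impCirLeft_alt arr grb (k - 1) sel = grb := by
      unfold impCirLeft_alt pvCands
      rw [PySem.List.pyRange_one_eq_nil (by omega)]
      rfl
    rw [hA, hA', if_neg (by rintro ⟨h1, h2, -⟩; omega), if_neg (by rintro ⟨h1, h2, -⟩; omega)]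
  · -- nonempty window: peel one position off each end
    have hcands : pvCands arr grb k sel =
        (if 0 ≤ grb - k ∧ pvGoodB arr grb sel (grb - k) = true then [grb - k] else []) ++
          pvCands arr grb (k - 1) sel ++
          (if grb + k ≤ (arr.length : Int) - 1 ∧ pvGoodB arr grb sel (grb + k) = true
            then [grb + k] else []) := by
      unfold pvCands
      rw [PySem.List.pyRange_one_append (max 0 (grb - k))
            (min ((arr.length : Int) - 1) (grb + (k - 1)) + 1)
            (min ((arr.length : Int) - 1) (grb + k) + 1) (by omega) (by omega),
          PySem.List.pyRange_one_append (max 0 (grb - k)) (max 0 (grb - (k - 1)))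
            (min ((arr.length : Int) - 1) (grb + (k - 1)) + 1) (by omega) (by omega),
          List.filter_append, List.filter_append]
      congr 1
      · congr 1
        · by_cases hL0 : 0 ≤ grb - k
          · rw [show max 0 (grb - k) = grb - k by omega,
                show max 0 (grb - (k - 1)) = (grb - k) + 1 by omega,
                PySem.List.pyRange_one_singleton]
            by_cases hg : pvGoodB arr grb sel (grb - k) = true
            · rw [if_pos ⟨hL0, hg⟩]; simp [hg]
            · rw [if_neg (by tauto)]; simp [List.filter]; simp at hg; simp [hg]
          · rw [show max 0 (grb - (k - 1)) = max 0 (grb - k) by omega,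
                PySem.List.pyRange_one_eq_nil le_rfl, if_neg (by tauto)]
            rfl
      · by_cases hR0 : grb + k ≤ (arr.length : Int) - 1
        · rw [show min ((arr.length : Int) - 1) (grb + (k - 1)) = grb + k - 1 by omega,
              show min ((arr.length : Int) - 1) (grb + k) = grb + k by omega,
              show grb + k - 1 + 1 = grb + k by ring]
          rw [show grb + k + 1 = (grb + k) + 1 by ring, PySem.List.pyRange_one_singleton]
          by_cases hg : pvGoodB arr grb sel (grb + k) = true
          · rw [if_pos ⟨hR0, hg⟩]; simp [hg]
          · rw [if_neg (by tauto)]; simp [List.filter]; simp at hg; simp [hg]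
        · rw [show min ((arr.length : Int) - 1) (grb + (k - 1)) = (arr.length : Int) - 1 by omega,
              show min ((arr.length : Int) - 1) (grb + k) = (arr.length : Int) - 1 by omega,
              PySem.List.pyRange_one_eq_nil le_rfl, if_neg (by tauto)]
          rfl
    unfold impCirLeft_alt
    rw [hcands, pv_min2_eq_foldl, List.foldl_append, List.foldl_append]
    by_cases hL : 0 ≤ grb - k ∧ pvGoodB arr grb sel (grb - k) = true
    · rw [if_pos hL]
      have hres : List.foldl (pvF grb)
          (List.foldl (pvF grb) (List.foldl (pvF grb) none [grb - k]) (pvCands arr grb (k - 1) sel))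
          (if grb + k ≤ (arr.length : Int) - 1 ∧ pvGoodB arr grb sel (grb + k) = true
            then [grb + k] else []) = some (grb - k) := by
        have h1 : List.foldl (pvF grb) none [grb - k] = some (grb - k) := rfl
        have hmid : List.foldl (pvF grb) (some (grb - k)) (pvCands arr grb (k - 1) sel) =
            some (grb - k) := by
          apply pv_foldl_some_const
          intro y hy
          obtain ⟨hy1, hy2, -⟩ := pv_mem_cands arr grb (k - 1) sel y hy
          simp [pvBeats, pvKey1, pvKey2, -Nat.cast_natAbs]
          split_ifs <;> omega
        rw [h1, hmid]
        split_ifs with hR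
        · apply pv_foldl_some_const
          intro y hy
          simp only [List.mem_singleton] at hy
          subst hy
          simp [pvBeats, pvKey1, pvKey2, -Nat.cast_natAbs]
          split_ifs <;> omega
        · rfl
      rw [hres, if_pos ⟨hL.1, by omega, hL.2⟩]
      rfl
    · rw [if_neg hL,
        if_neg (show ¬(0 ≤ grb - k ∧ grb - k < (arr.length : Int) ∧
            pvGoodB arr grb sel (grb - k) = true) by
          rintro ⟨h1, h2, h3⟩; exact hL ⟨h1, h3⟩)]
      simp only [List.foldl_nil]
      by_cases hR : grb + k ≤ (arr.length : Int) - 1 ∧ pvGoodB arr grb sel (grb + k) = true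
      · rw [if_pos hR, if_pos ⟨by omega, by omega, hR.2⟩]
        cases hmid : List.foldl (pvF grb) none (pvCands arr grb (k - 1) sel) with
        | none => rfl
        | some m =>
          have hm := pv_mem_cands arr grb (k - 1) sel m (pv_foldl_none_mem grb _ m hmid)
          simp only [List.foldl_cons, List.foldl_nil, pvF]
          rw [if_pos]
          · rfl
          · obtain ⟨hm1, hm2, -⟩ := hm
            simp [pvBeats, pvKey1, pvKey2, -Nat.cast_natAbs]
            split_ifs <;> omega
      · rw [if_neg hR,
          if_neg (show ¬(0 ≤ grb + k ∧ grb + k < (arr.length : Int) ∧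
              pvGoodB arr grb sel (grb + k) = true) by
            rintro ⟨h1, h2, h3⟩; exact hR ⟨by omega, h3⟩)]
        rw [pv_min2_eq_foldl]
        rfl

theorem pvA_rec (arr : List String) (grb k : Int) (sel : List Int) (hk : 1 ≤ k) :
    impCirLeft arr grb k sel =
      if 0 ≤ grb - k ∧ grb - k < (arr.length : Int) ∧ pvGoodB arr grb sel (grb - k) = true then grb - k
      else if 0 ≤ grb + k ∧ grb + k < (arr.length : Int) ∧ pvGoodB arr grb sel (grb + k) = true then grb + k
      else impCirLeft arr grb (k - 1) sel := by
  unfold impCirLeft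
  rw [PySem.List.pyRange_neg_one_cons (show (0:Int) < k by omega)]
  simp only [pvLoopA, pvInnerA]
  have e1 : grb + k * (-1) = grb - k := by ring
  have e2 : grb + k * 1 = grb + k := by ring
  rw [e1, e2, pvCheckA_eq arr sel grb (grb - k) (by omega),
    pvCheckA_eq arr sel grb (grb + k) (by omega)]
  split_ifs <;> rfl

theorem pv_main (arr : List String) (grb k : Int) (sel : List Int) :
    impCirLeft arr grb k sel = impCirLeft_alt arr grb k sel := by
  induction hm : k.toNat generalizing k with
  | zero =>
    rw [pvB_nonpos arr grb k sel (by omega)]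
    unfold impCirLeft
    rw [PySem.List.pyRange_neg_one_eq_nil (by omega)]
    rfl
  | succ m ih =>
    rw [pvA_rec arr grb k sel (by omega), pvB_rec arr grb k sel (by omega),
      ih (k - 1) (by omega)]

-- ===== VERDICT (by name: the statement is the Claim_ definition above) =====
theorem impCirLeft_spec : Claim_equal_impCirLeft := by
  intro arr grb k sel _
  unfold Spec_impCirLeft
  exact pv_main arr grb k sel
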